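-- pv_equiv track=rewrite | github.com/destifo/CP-Codeforces | C. Board Moves/BoardMoves.py | findBoardMoves
-- ===== SOURCE A (Python) =====
-- def findBoardMoves(n: int) -> int:
--     moves = 0
--
--     while n > 1:
--         edge_cells = 2 * n + 2 * (n-2)
--         move_to_center = n // 2
--         moves += (edge_cells * move_to_center)
--         n -=2
--
--     return moves
-- ===== SOURCE B (Python) =====
-- def findBoardMoves(n: int) -> int:
--     # Closed form: rings k = n, n-2, ... contribute (4k-4)*(k//2).
--     if n <= 1:
--         return 0
--     m = n // 2
--     base = 4 * m * (m + 1) * (2 * m + 1) // 3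
--     if n % 2 == 0:
--         return base - 2 * m * (m + 1)
--     return base
-- ===== Notes on version B (the rewrite author's own statement) =====
-- stated objective: faster
-- what changed: Replaces the O(n) ring-by-ring while loop with a closed-form sum-of-squares formula evaluated in O(1).
import Mathlib
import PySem

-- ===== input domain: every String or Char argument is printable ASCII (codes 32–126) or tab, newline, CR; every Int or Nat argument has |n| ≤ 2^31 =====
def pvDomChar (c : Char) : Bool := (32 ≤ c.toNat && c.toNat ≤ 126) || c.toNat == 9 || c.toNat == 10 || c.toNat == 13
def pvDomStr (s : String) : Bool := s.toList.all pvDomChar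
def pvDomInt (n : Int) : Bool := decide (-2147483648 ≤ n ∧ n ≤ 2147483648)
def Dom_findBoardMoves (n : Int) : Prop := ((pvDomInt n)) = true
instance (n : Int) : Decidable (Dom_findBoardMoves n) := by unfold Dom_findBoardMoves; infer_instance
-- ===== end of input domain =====

-- B replaces A's ring-by-ring while loop with a closed-form (sum-of-squares) formula.

-- ===== PORT A =====
-- the while loop, as structural recursion on the decreasing n
def findBoardMovesGo (n : Int) (moves : Int) : Int :=
  if _h : n > 1 then
    findBoardMovesGo (n - 2)
      (moves + (2 * n + 2 * (n - 2)) * PySem.Int.floordiv n 2)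
  else moves
termination_by n.toNat
decreasing_by
  omega

def findBoardMoves (n : Int) : Int := findBoardMovesGo n 0

-- ===== PORT B =====
def findBoardMoves_alt (n : Int) : Int :=
  if n ≤ 1 then 0
  else
    let m := PySem.Int.floordiv n 2
    let base := PySem.Int.floordiv (4 * m * (m + 1) * (2 * m + 1)) 3
    if PySem.Int.mod n 2 = 0 then base - 2 * m * (m + 1) else base

-- ===== PRECONDITION & SPEC =====
def Spec_findBoardMoves (n : Int) (out : Int) : Prop := out = findBoardMoves_alt n
instance (n : Int) (out : Int) : Decidable (Spec_findBoardMoves n out) := by unfold Spec_findBoardMoves; infer_instance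

-- ===== CLAIM (what is proved, stated in full; the proofs are below) =====
def Claim_equal_findBoardMoves : Prop := ∀ (n : Int), Dom_findBoardMoves n → Spec_findBoardMoves n (findBoardMoves n)

-- ===== LEMMAS AND PROOFS =====

-- 3 divides m(m+1)(2m+1), with an explicit witness
theorem tri3 (m : Int) : ∃ k, m * (m + 1) * (2 * m + 1) = 3 * k := by
  obtain ⟨q, r, hr0, hr3, hm⟩ : ∃ q r : Int, 0 ≤ r ∧ r < 3 ∧ m = 3 * q + r :=
    ⟨m / 3, m % 3, by omega, by omega, by omega⟩
  interval_cases r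
  · exact ⟨q * (m + 1) * (2 * m + 1), by subst hm; ring⟩
  · exact ⟨m * (m + 1) * (2 * q + 1), by subst hm; ring⟩
  · exact ⟨m * (q + 1) * (2 * m + 1), by subst hm; ring⟩

-- pull the factor 4 out of B's //3
theorem pull4 (m : Int) : 4 * m * (m + 1) * (2 * m + 1) / 3 = 4 * (m * (m + 1) * (2 * m + 1) / 3) := by
  obtain ⟨k, hk⟩ := tri3 m
  have h4 : 4 * m * (m + 1) * (2 * m + 1) = 3 * (4 * k) := by linear_combination 4 * hk
  rw [hk, h4, Int.mul_ediv_cancel_left _ (by norm_num : (3:Int) ≠ 0),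
    Int.mul_ediv_cancel_left _ (by norm_num : (3:Int) ≠ 0)]

-- step of the exact sum of squares: S m = S (m-1) + 2 m²
theorem sumsq_step (m : Int) :
    m * (m + 1) * (2 * m + 1) / 3 = (m - 1) * m * (2 * m - 1) / 3 + 2 * m * m := by
  obtain ⟨k, hk⟩ := tri3 (m - 1)
  have h1 : (m - 1) * m * (2 * m - 1) = 3 * k := by linear_combination hk
  have h2 : m * (m + 1) * (2 * m + 1) = 3 * (k + 2 * m * m) := by linear_combination hk
  rw [h1, h2, Int.mul_ediv_cancel_left _ (by norm_num : (3:Int) ≠ 0),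
    Int.mul_ediv_cancel_left _ (by norm_num : (3:Int) ≠ 0)]

-- closed forms of B on even and odd inputs > 1
theorem alt_even (m : Int) (hm : 1 ≤ m) :
    findBoardMoves_alt (2 * m) = 4 * (m * (m + 1) * (2 * m + 1) / 3) - 2 * m * (m + 1) := by
  unfold findBoardMoves_alt
  rw [if_neg (by omega)]
  have h2 : PySem.Int.floordiv (2 * m) 2 = m := by
    rw [PySem.Int.floordiv_eq_ediv_of_pos (by omega)]; omega
  have hmod : PySem.Int.mod (2 * m) 2 = 0 := by
    rw [PySem.Int.mod_eq_emod_of_pos (by omega)]; omega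
  simp only [h2, hmod]
  rw [if_pos trivial, PySem.Int.floordiv_eq_ediv_of_pos (show (0:Int) < 3 by norm_num), pull4 m]

theorem alt_odd (m : Int) (hm : 1 ≤ m) :
    findBoardMoves_alt (2 * m + 1) = 4 * (m * (m + 1) * (2 * m + 1) / 3) := by
  unfold findBoardMoves_alt
  rw [if_neg (by omega)]
  have h2 : PySem.Int.floordiv (2 * m + 1) 2 = m := by
    rw [PySem.Int.floordiv_eq_ediv_of_pos (by omega)]; omega
  have hmod : PySem.Int.mod (2 * m + 1) 2 = 1 := by
    rw [PySem.Int.mod_eq_emod_of_pos (by omega)]; omega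
  simp only [h2, hmod]
  rw [if_neg (by simp), PySem.Int.floordiv_eq_ediv_of_pos (show (0:Int) < 3 by norm_num), pull4 m]

theorem alt_le_one (n : Int) (h : n ≤ 1) : findBoardMoves_alt n = 0 := by
  unfold findBoardMoves_alt; rw [if_pos h]

-- key step: B's closed form satisfies A's loop recurrence
theorem alt_step (n : Int) (hn : n > 1) :
    findBoardMoves_alt n = (2 * n + 2 * (n - 2)) * PySem.Int.floordiv n 2 + findBoardMoves_alt (n - 2) := by
  have hfd : PySem.Int.floordiv n 2 = n / 2 :=
    PySem.Int.floordiv_eq_ediv_of_pos (by omega)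
  rcases Int.even_or_odd n with ⟨m, hm⟩ | ⟨m, hm⟩
  · -- n = 2m
    have hm1 : 1 ≤ m := by omega
    have hdiv : n / 2 = m := by omega
    have hne : n = 2 * m := by omega
    rw [hfd, hdiv, hne, alt_even m hm1]
    rcases eq_or_lt_of_le hm1 with h | h
    · rw [← h, alt_le_one (2 * 1 - 2) (by norm_num)]
      norm_num
    · have he : 2 * m - 2 = 2 * (m - 1) := by ring
      rw [he, alt_even (m - 1) (by omega)]
      have hs := sumsq_step m
      have hrw : (m - 1) * ((m - 1) + 1) * (2 * (m - 1) + 1) = (m - 1) * m * (2 * m - 1) := by ring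
      rw [hrw, hs]
      ring
  · -- n = 2m + 1
    have hm1 : 1 ≤ m := by omega
    have hdiv : n / 2 = m := by omega
    have hne : n = 2 * m + 1 := by omega
    rw [hfd, hdiv, hne, alt_odd m hm1]
    rcases eq_or_lt_of_le hm1 with h | h
    · rw [← h, alt_le_one (2 * 1 + 1 - 2) (by norm_num)]
      norm_num
    · have he : 2 * m + 1 - 2 = 2 * (m - 1) + 1 := by ring
      rw [he, alt_odd (m - 1) (by omega)]
      have hrw : (m - 1) * ((m - 1) + 1) * (2 * (m - 1) + 1) = (m - 1) * m * (2 * m - 1) := by ring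
      rw [hrw, sumsq_step m]
      ring

-- loop invariant: the accumulator passes through
theorem go_eq (n moves : Int) : findBoardMovesGo n moves = moves + findBoardMoves_alt n := by
  by_cases h : n > 1
  · unfold findBoardMovesGo
    rw [dif_pos h,
      go_eq (n - 2) (moves + (2 * n + 2 * (n - 2)) * PySem.Int.floordiv n 2),
      alt_step n h]
    ring
  · unfold findBoardMovesGo
    rw [dif_neg h, alt_le_one n (by omega)]
    ring
termination_by n.toNat
decreasing_by
  omega

-- ===== VERDICT (by name: the statement is the Claim_ definition above) =====
theorem findBoardMoves_spec : Claim_equal_findBoardMoves := by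
  intro n _
  unfold Spec_findBoardMoves findBoardMoves
  rw [go_eq]
  ring
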